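-- pv_equiv track=rewrite | github.com/kayba-ai/autoharness | src/autoharness/validation.py | select_primary_failure_class
-- ===== SOURCE A (Python) =====
-- _FAILURE_CLASS_PRIORITY = {
--     "benchmark_signal_error": 70,
--     "benchmark_process_error": 65,
--     "benchmark_adapter_validation_error": 60,
--     "benchmark_artifact_parse_error": 55,
--     "benchmark_metrics_parse_error": 52,
--     "benchmark_task_results_parse_error": 51,
--     "benchmark_timeout": 50,
--     "preflight_failed": 45,
--     "benchmark_command_failed": 40,
--     "benchmark_failed": 30,
-- }
--
-- def select_primary_failure_class(
--     failure_class_counts: dict[str, int] | None,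
-- ) -> str | None:
--     if not isinstance(failure_class_counts, dict) or not failure_class_counts:
--         return None
--     ranked = sorted(
--         (
--             (str(failure_class), int(count))
--             for failure_class, count in failure_class_counts.items()
--             if isinstance(failure_class, str)
--         ),
--         key=lambda item: (
--             -item[1],
--             -_FAILURE_CLASS_PRIORITY.get(item[0], 0),
--             item[0],
--         ),
--     )
--     return ranked[0][0] if ranked else None
-- ===== SOURCE B (Python) =====
-- _FAILURE_CLASS_PRIORITY = {
--     "benchmark_signal_error": 70,
--     "benchmark_process_error": 65,
--     "benchmark_adapter_validation_error": 60,
--     "benchmark_artifact_parse_error": 55,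
--     "benchmark_metrics_parse_error": 52,
--     "benchmark_task_results_parse_error": 51,
--     "benchmark_timeout": 50,
--     "preflight_failed": 45,
--     "benchmark_command_failed": 40,
--     "benchmark_failed": 30,
-- }
--
--
-- def select_primary_failure_class(failure_class_counts):
--     if not isinstance(failure_class_counts, dict):
--         return None
--     best = None  # (name, count, priority) of the winner so far
--     for failure_class, count in failure_class_counts.items():
--         if not isinstance(failure_class, str):
--             continue
--         name = str(failure_class)
--         c = int(count)
--         p = _FAILURE_CLASS_PRIORITY.get(name, 0)
--         if best is None:
--             best = (name, c, p)
--         else: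
--             bn, bc, bp = best
--             if c > bc or (c == bc and (p > bp or (p == bp and name < bn))):
--                 best = (name, c, p)
--     return best[0] if best is not None else None
-- ===== Notes on version B (the rewrite author's own statement) =====
-- stated objective: faster
-- what changed: Replaces the build-a-list-and-sort-by-composite-key selection with a single linear best-so-far scan over the entries (count desc, then priority desc, then name asc), so no ranked list is ever built or sorted.
import Mathlib
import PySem

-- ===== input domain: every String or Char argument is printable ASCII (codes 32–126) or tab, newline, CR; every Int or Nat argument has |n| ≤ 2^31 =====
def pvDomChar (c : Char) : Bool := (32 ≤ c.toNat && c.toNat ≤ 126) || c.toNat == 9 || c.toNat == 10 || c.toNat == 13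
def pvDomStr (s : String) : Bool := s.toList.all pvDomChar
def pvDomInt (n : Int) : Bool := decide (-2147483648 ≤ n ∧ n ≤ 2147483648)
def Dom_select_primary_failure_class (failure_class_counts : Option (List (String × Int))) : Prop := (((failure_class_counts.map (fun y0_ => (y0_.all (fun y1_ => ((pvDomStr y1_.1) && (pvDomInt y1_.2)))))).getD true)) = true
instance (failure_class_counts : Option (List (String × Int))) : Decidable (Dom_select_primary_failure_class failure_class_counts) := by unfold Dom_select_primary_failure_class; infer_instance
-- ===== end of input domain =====

-- B replaces the sort-by-composite-key-and-take-head with a single linear best-so-far scan (no ranked list is built);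
-- return values only, neither version mutates its argument.

-- ===== PORT A =====
-- module constant _FAILURE_CLASS_PRIORITY
def pvPriority : PySem.Dict String Int := PySem.Dict.ofList
  [("benchmark_signal_error", 70),
   ("benchmark_process_error", 65),
   ("benchmark_adapter_validation_error", 60),
   ("benchmark_artifact_parse_error", 55),
   ("benchmark_metrics_parse_error", 52),
   ("benchmark_task_results_parse_error", 51),
   ("benchmark_timeout", 50),
   ("preflight_failed", 45),
   ("benchmark_command_failed", 40),
   ("benchmark_failed", 30)]

-- _FAILURE_CLASS_PRIORITY.get(key, 0)
def pvPrio (s : String) : Int := pvPriority.getD s 0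

-- Python key tuple (-count, -priority, name) as a lexicographic triple (Python compares tuples lexicographically)
def select_primary_failure_class (failure_class_counts : Option (List (String × Int))) : Option String :=
  match failure_class_counts with
  | none => none                                -- `not isinstance(..., dict)` branch: None input
  | some items =>
    if items = [] then none                     -- `not failure_class_counts`: empty dict
    else
      -- the generator: keys are str by the declared type, so `isinstance(failure_class, str)` keeps every
      -- entry and `str(...)`/`int(...)` are the identity on str/int
      let ranked := PySem.List.sorted items
        (fun item => (toLex (-item.2, toLex (-(pvPrio item.1), item.1)) : Int ×ₗ (Int ×ₗ String))) false
      match ranked with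
      | [] => none                              -- `ranked[0][0] if ranked else None`
      | r :: _ => some r.1

-- ===== PORT B =====
-- one step of Source B's loop: keep `best = (name, count, priority)`, replace only when strictly better
def pvStep (best : Option (String × Int × Int)) (it : String × Int) : Option (String × Int × Int) :=
  let p := pvPrio it.1
  match best with
  | none => some (it.1, it.2, p)
  | some (bn, bc, bp) =>
    if it.2 > bc ∨ (it.2 = bc ∧ (p > bp ∨ (p = bp ∧ it.1 < bn))) then some (it.1, it.2, p)
    else some (bn, bc, bp)

def select_primary_failure_class_alt (failure_class_counts : Option (List (String × Int))) : Option String :=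
  match failure_class_counts with
  | none => none
  | some items => (items.foldl pvStep none).map (·.1)

-- ===== PRECONDITION & SPEC =====
def Spec_select_primary_failure_class (failure_class_counts : Option (List (String × Int))) (out : Option String) : Prop := out = select_primary_failure_class_alt failure_class_counts
instance (failure_class_counts : Option (List (String × Int))) (out : Option String) : Decidable (Spec_select_primary_failure_class failure_class_counts out) := by unfold Spec_select_primary_failure_class; infer_instance

-- ===== CLAIM (what is proved, stated in full; the proofs are below) =====
def Claim_equal_select_primary_failure_class : Prop := ∀ (failure_class_counts : Option (List (String × Int))), Dom_select_primary_failure_class failure_class_counts → Spec_select_primary_failure_class failure_class_counts (select_primary_failure_class failure_class_counts)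

-- ===== LEMMAS AND PROOFS =====

-- the triple B maintains, and its composite key (equal to A's sort key on pvTrip it)
def pvTrip (it : String × Int) : String × Int × Int := (it.1, it.2, pvPrio it.1)
def pvKey3 (t : String × Int × Int) : Int ×ₗ (Int ×ₗ String) := toLex (-t.2.1, toLex (-t.2.2, t.1))

theorem pvCond_iff (it : String × Int) (bn : String) (bc bp : Int) :
    (it.2 > bc ∨ (it.2 = bc ∧ (pvPrio it.1 > bp ∨ (pvPrio it.1 = bp ∧ it.1 < bn))))
      ↔ pvKey3 (pvTrip it) < pvKey3 (bn, bc, bp) := by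
  simp only [pvKey3, pvTrip, Prod.Lex.lt_iff, ofLex_toLex, neg_lt_neg_iff, neg_inj, gt_iff_lt]

theorem pvKey3_fst_eq {a b : String × Int × Int} (h : pvKey3 a = pvKey3 b) : a.1 = b.1 := by
  unfold pvKey3 at h
  have h1 : ((-a.2.1 : Int), (toLex (-a.2.2, a.1) : Int ×ₗ String))
      = (-b.2.1, toLex (-b.2.2, b.1)) := toLex.injective h
  have h2 : (toLex ((-a.2.2 : Int), a.1) : Int ×ₗ String) = toLex (-b.2.2, b.1) :=
    congrArg Prod.snd h1
  have h3 : ((-a.2.2 : Int), a.1) = (-b.2.2, b.1) := toLex.injective h2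
  exact congrArg Prod.snd h3

theorem pvStep_some (bn : String) (bc bp : Int) (it : String × Int) :
    pvStep (some (bn, bc, bp)) it =
      if it.2 > bc ∨ (it.2 = bc ∧ (pvPrio it.1 > bp ∨ (pvPrio it.1 = bp ∧ it.1 < bn)))
      then some (pvTrip it) else some (bn, bc, bp) := rfl

theorem pvFoldl_pvStep_min (items : List (String × Int)) (b : String × Int × Int) :
    ∃ r, items.foldl pvStep (some b) = some r ∧
      pvKey3 r ≤ pvKey3 b ∧
      (∀ it ∈ items, pvKey3 r ≤ pvKey3 (pvTrip it)) ∧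
      (r = b ∨ ∃ it ∈ items, r = pvTrip it) := by
  induction items generalizing b with
  | nil => exact ⟨b, rfl, le_refl _, by simp, Or.inl rfl⟩
  | cons it its ih =>
    obtain ⟨bn, bc, bp⟩ := b
    by_cases hc : it.2 > bc ∨ (it.2 = bc ∧ (pvPrio it.1 > bp ∨ (pvPrio it.1 = bp ∧ it.1 < bn)))
    · have hstep : pvStep (some (bn, bc, bp)) it = some (pvTrip it) := by
        rw [pvStep_some, if_pos hc]
      obtain ⟨r, hr, h1, h2, h3⟩ := ih (pvTrip it)
      refine ⟨r, ?_, ?_, ?_, ?_⟩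
      · rw [List.foldl_cons, hstep]; exact hr
      · exact le_trans h1 (le_of_lt ((pvCond_iff it bn bc bp).mp hc))
      · intro y hy
        rcases List.mem_cons.mp hy with hy | hy
        · exact hy ▸ h1
        · exact h2 y hy
      · rcases h3 with h3 | ⟨z, hz, hz'⟩
        · exact Or.inr ⟨it, List.mem_cons_self .., h3⟩
        · exact Or.inr ⟨z, List.mem_cons_of_mem _ hz, hz'⟩
    · have hstep : pvStep (some (bn, bc, bp)) it = some (bn, bc, bp) := by
        rw [pvStep_some, if_neg hc]
      have hge : pvKey3 (bn, bc, bp) ≤ pvKey3 (pvTrip it) :=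
        le_of_not_gt (fun h => hc ((pvCond_iff it bn bc bp).mpr h))
      obtain ⟨r, hr, h1, h2, h3⟩ := ih (bn, bc, bp)
      refine ⟨r, ?_, h1, ?_, ?_⟩
      · rw [List.foldl_cons, hstep]; exact hr
      · intro y hy
        rcases List.mem_cons.mp hy with hy | hy
        · exact hy ▸ le_trans h1 hge
        · exact h2 y hy
      · rcases h3 with h3 | ⟨z, hz, hz'⟩
        · exact Or.inl h3
        · exact Or.inr ⟨z, List.mem_cons_of_mem _ hz, hz'⟩

-- ===== VERDICT (by name: the statement is the Claim_ definition above) =====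
theorem select_primary_failure_class_spec : Claim_equal_select_primary_failure_class := by
  intro fcc _
  unfold Spec_select_primary_failure_class
  cases fcc with
  | none => rfl
  | some items =>
    cases items with
    | nil => rfl
    | cons x xs =>
      simp only [select_primary_failure_class, select_primary_failure_class_alt]
      rw [if_neg (by simp : ¬ (x :: xs = []))]
      cases hs : PySem.List.sorted (x :: xs)
          (fun item => (toLex (-item.2, toLex (-(pvPrio item.1), item.1)) : Int ×ₗ (Int ×ₗ String))) false with
      | nil =>
        have hnil : (x :: xs : List (String × Int)) = [] := (PySem.List.sorted_eq_nil_iff _ _ _).mp hs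
        exact absurd hnil (List.cons_ne_nil _ _)
      | cons m t =>
        have hstep0 : pvStep none x = some (pvTrip x) := by simp [pvStep, pvTrip]
        rw [List.foldl_cons, hstep0]
        obtain ⟨r, hr, hle_b, hall, hsrc⟩ := pvFoldl_pvStep_min xs (pvTrip x)
        rw [hr]
        -- head of the sorted list is key-minimal
        have hmin : ∀ y ∈ x :: xs, pvKey3 (pvTrip m) ≤ pvKey3 (pvTrip y) :=
          PySem.List.key_head_sorted_le _ _ hs
        have hm : m ∈ x :: xs := by
          have : m ∈ PySem.List.sorted (x :: xs)
              (fun item => (toLex (-item.2, toLex (-(pvPrio item.1), item.1)) : Int ×ₗ (Int ×ₗ String))) false := by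
            rw [hs]; exact List.mem_cons_self ..
          exact (PySem.List.mem_sorted _ _ _ _).mp this
        -- B's result r is key-minimal too, and comes from some entry it0
        have h1 : pvKey3 r ≤ pvKey3 (pvTrip m) := by
          rcases List.mem_cons.mp hm with hm' | hm'
          · exact hm' ▸ hle_b
          · exact hall m hm'
        obtain ⟨it0, hit0mem, hit0⟩ :
            ∃ it0 ∈ x :: xs, r = pvTrip it0 := by
          rcases hsrc with h | ⟨z, hz, hz'⟩
          · exact ⟨x, List.mem_cons_self .., h⟩
          · exact ⟨z, List.mem_cons_of_mem _ hz, hz'⟩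
        have h2 : pvKey3 (pvTrip m) ≤ pvKey3 r := by
          rw [hit0]; exact hmin it0 hit0mem
        have heq : pvKey3 (pvTrip m) = pvKey3 r := le_antisymm h2 h1
        have : (pvTrip m).1 = r.1 := pvKey3_fst_eq heq
        simp only [Option.map_some]
        exact congrArg some this
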